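-- pv_equiv track=rewrite | github.com/op15066212/Solution | 2023 yard hoof cup/Python The end scene/2.py | find
-- ===== SOURCE A (Python) =====
-- def find(it: str) -> int:
--     k = 0
--     i = 0
--     j = 1
--     n = len(it)
--     while k < n and i < n and j < n:
--         if it[(i + k) % n] == it[(j + k) % n]:
--             k += 1
--             continue
--         if it[(i + k) % n] > it[(j + k) % n]:
--             i += k + 1
--         else:
--             j += k + 1
--         if i == j:
--             i += 1
--         k = 0
--     return min(i, j)
-- ===== SOURCE B (Python) =====
-- def find(it: str) -> int:
--     n = len(it)
--     best = 0
--     for i in range(1, n):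
--         if it[i:] + it[:i] < it[best:] + it[:best]:
--             best = i
--     return best
-- ===== Notes on version B (the rewrite author's own statement) =====
-- stated objective: simpler
-- what changed: Replaced the O(n) two-pointer duel (Booth-style skip algorithm with modular indexing and pointer jumps) by a plain brute-force scan that builds each rotation by slicing and keeps the first lexicographically smallest one.
import Mathlib
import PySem

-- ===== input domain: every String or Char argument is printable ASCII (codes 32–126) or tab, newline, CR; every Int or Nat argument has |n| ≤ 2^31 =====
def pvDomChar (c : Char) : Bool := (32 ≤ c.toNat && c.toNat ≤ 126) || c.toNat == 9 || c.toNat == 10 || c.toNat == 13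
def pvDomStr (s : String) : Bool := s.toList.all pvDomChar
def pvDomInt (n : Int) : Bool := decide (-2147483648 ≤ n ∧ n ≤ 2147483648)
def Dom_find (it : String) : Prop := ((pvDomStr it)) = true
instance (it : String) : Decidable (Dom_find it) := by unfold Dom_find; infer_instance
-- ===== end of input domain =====

-- B replaces A's two-pointer duel by a brute-force first-minimal-rotation scan (simpler, not faster).

-- ===== PORT A =====
-- it[(i+k) % n]: the index (i+k) % n is always in [0, n) when the loop runs, so getD is exact.
def cAt (l : List Char) (x : Nat) : Char := l.getD (x % l.length) ' '

-- the while loop of A; state (k, i, j), n = l.length; k+i+j strictly increases each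
-- iteration, so fuel 3*n (a totality guard only, proved sufficient below) never runs out
def findLoop (l : List Char) (fuel k i j : Nat) : Nat :=
  match fuel with
  | 0 => min i j
  | fuel + 1 =>
    if k < l.length ∧ i < l.length ∧ j < l.length then
      if cAt l (i + k) = cAt l (j + k) then
        findLoop l fuel (k + 1) i j
      else if cAt l (j + k) < cAt l (i + k) then  -- it[(i+k)%n] > it[(j+k)%n]: i += k+1 (then i==j bump)
        findLoop l fuel 0 (if i + k + 1 = j then i + k + 2 else i + k + 1) j
      else                                        -- j += k+1 (then i==j bump)
        findLoop l fuel 0 (if i = j + k + 1 then i + 1 else i) (j + k + 1)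
    else
      min i j

def find (it : String) : Int := Int.ofNat (findLoop it.toList (3 * it.toList.length) 0 0 1)

-- ===== PORT B =====
-- Python string '<': lexicographic comparison of code points
def lexLt : List Char → List Char → Bool
  | _, [] => false
  | [], _ :: _ => true
  | a :: as, b :: bs => if a < b then true else if b < a then false else lexLt as bs

-- it[i:] + it[:i] for 0 ≤ i ≤ n
def rotB (l : List Char) (i : Nat) : List Char := l.drop i ++ l.take i

def findLoopB (l : List Char) (best : Nat) : List Nat → Nat
  | [] => best
  | i :: rest => findLoopB l (if lexLt (rotB l i) (rotB l best) then i else best) rest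

-- for i in range(1, n): keep the first strictly smaller rotation
def find_alt (it : String) : Int :=
  Int.ofNat (findLoopB it.toList 0 (List.range' 1 (it.toList.length - 1)))

-- ===== PRECONDITION & SPEC =====
def Spec_find (it : String) (out : Int) : Prop := out = find_alt it
instance (it : String) (out : Int) : Decidable (Spec_find it out) := by unfold Spec_find; infer_instance

-- ===== CLAIM (what is proved, stated in full; the proofs are below) =====
def Claim_equal_find : Prop := ∀ (it : String), Dom_find it → Spec_find it (find it)

-- ===== LEMMAS AND PROOFS =====

-- rotation of l starting (cyclically) at position a, described pointwise
def Rot (l : List Char) (a : Nat) : List Char :=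
  (List.range l.length).map (fun p => cAt l (a + p))

theorem length_Rot (l : List Char) (a : Nat) : (Rot l a).length = l.length := by
  simp [Rot]

theorem cAt_congr (l : List Char) {x y : Nat} (h : x % l.length = y % l.length) :
    cAt l x = cAt l y := by simp [cAt, h]

theorem cAt_add_len (l : List Char) (x : Nat) : cAt l (x + l.length) = cAt l x := by
  apply cAt_congr; simp

theorem cAt_add_mod (l : List Char) (a b : Nat) :
    cAt l (a + b % l.length) = cAt l (a + b) := by
  apply cAt_congr
  conv_rhs => rw [Nat.add_mod]
  rw [Nat.add_mod a (b % l.length)]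
  simp [Nat.mod_mod_of_dvd]

theorem Rot_congr (l : List Char) {a b : Nat}
    (h : ∀ p, p < l.length → cAt l (a + p) = cAt l (b + p)) : Rot l a = Rot l b := by
  unfold Rot
  apply List.map_congr_left
  intro p hp
  exact h p (List.mem_range.mp hp)

theorem Rot_mod (l : List Char) (a : Nat) : Rot l (a % l.length) = Rot l a := by
  apply Rot_congr
  intro p _
  calc cAt l (a % l.length + p)
      = cAt l (p + a % l.length) := by rw [Nat.add_comm]
    _ = cAt l (p + a) := cAt_add_mod l p a
    _ = cAt l (a + p) := by rw [Nat.add_comm]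

theorem Rot_getD (l : List Char) (a p : Nat) (hp : p < l.length) :
    (Rot l a).getD p ' ' = cAt l (a + p) := by
  rw [List.getD_eq_getElem _ _ (by simpa [length_Rot] using hp)]
  simp [Rot]

theorem lexLt_cons (x y : Char) (xs ys : List Char) :
    lexLt (x :: xs) (y :: ys) = true ↔ x < y ∨ (x = y ∧ lexLt xs ys = true) := by
  simp only [lexLt]
  split_ifs with h1 h2
  · simp [h1]
  · constructor
    · intro h; simp at h
    · rintro (h | ⟨rfl, _⟩)
      · exact absurd h h1
      · exact absurd h2 (lt_irrefl _)
  · have hxy : x = y := le_antisymm (not_lt.mp h2) (not_lt.mp h1)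
    subst hxy
    simp

theorem lexLt_irrefl (a : List Char) : lexLt a a = false := by
  induction a with
  | nil => rfl
  | cons x xs ih => simp [lexLt, ih]

theorem lexLt_trans : ∀ {a b c : List Char},
    lexLt a b = true → lexLt b c = true → lexLt a c = true := by
  intro a
  induction a with
  | nil =>
    intro b c hab hbc
    cases b with
    | nil => simp [lexLt] at hab
    | cons y ys =>
      cases c with
      | nil => simp [lexLt] at hbc
      | cons z zs => simp [lexLt]
  | cons x xs ih =>
    intro b c hab hbc
    cases b with
    | nil => simp [lexLt] at hab
    | cons y ys =>
      cases c with
      | nil => simp [lexLt] at hbc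
      | cons z zs =>
        rw [lexLt_cons] at hab hbc ⊢
        rcases hab with h1 | ⟨rfl, h1⟩
        · rcases hbc with h2 | ⟨rfl, h2⟩
          · exact Or.inl (lt_trans h1 h2)
          · exact Or.inl h1
        · rcases hbc with h2 | ⟨rfl, h2⟩
          · exact Or.inl h2
          · exact Or.inr ⟨rfl, ih h1 h2⟩

theorem lexLt_total : ∀ {a b : List Char}, a.length = b.length →
    lexLt a b = true ∨ lexLt b a = true ∨ a = b := by
  intro a
  induction a with
  | nil =>
    intro b h
    cases b with
    | nil => exact Or.inr (Or.inr rfl)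
    | cons y ys => simp at h
  | cons x xs ih =>
    intro b h
    cases b with
    | nil => simp at h
    | cons y ys =>
      rcases lt_trichotomy x y with h1 | h1 | h1
      · exact Or.inl ((lexLt_cons ..).mpr (Or.inl h1))
      · subst h1
        rcases ih (by simpa using h) with h2 | h2 | h2
        · exact Or.inl ((lexLt_cons ..).mpr (Or.inr ⟨rfl, h2⟩))
        · exact Or.inr (Or.inl ((lexLt_cons ..).mpr (Or.inr ⟨rfl, h2⟩)))
        · exact Or.inr (Or.inr (by rw [h2]))
      · exact Or.inr (Or.inl ((lexLt_cons ..).mpr (Or.inl h1)))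

-- lists that agree strictly below r and have a '<' at position r compare as lexLt
theorem lexLt_of_agree : ∀ (r : Nat) (a b : List Char), r < a.length → r < b.length →
    (∀ p, p < r → a.getD p ' ' = b.getD p ' ') → a.getD r ' ' < b.getD r ' ' →
    lexLt a b = true := by
  intro r
  induction r with
  | zero =>
    intro a b ha hb _ hlt
    cases a with
    | nil => simp at ha
    | cons x xs =>
      cases b with
      | nil => simp at hb
      | cons y ys =>
        simp only [List.getD_cons_zero] at hlt
        exact (lexLt_cons ..).mpr (Or.inl hlt)
  | succ r ih =>
    intro a b ha hb hagree hlt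
    cases a with
    | nil => simp at ha
    | cons x xs =>
      cases b with
      | nil => simp at hb
      | cons y ys =>
        have hxy : x = y := by
          have := hagree 0 (Nat.succ_pos r)
          simpa using this
        apply (lexLt_cons ..).mpr
        refine Or.inr ⟨hxy, ih xs ys (by simpa using ha) (by simpa using hb) ?_ ?_⟩
        · intro p hp
          have := hagree (p + 1) (by omega)
          simpa using this
        · simpa using hlt

-- rotB coincides with Rot for indices ≤ length
theorem rotB_eq_Rot (l : List Char) (a : Nat) (ha : a ≤ l.length) :
    rotB l a = Rot l a := by
  apply List.ext_getElem
  · simp [rotB, length_Rot]; omega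
  intro p hp hp2
  have hn : p < l.length := by simpa [length_Rot] using hp2
  have hRot : (Rot l a)[p] = cAt l (a + p) := by simp [Rot]
  rw [hRot]
  unfold rotB cAt
  by_cases hc : p < l.length - a
  · have hm : (a + p) % l.length = a + p := Nat.mod_eq_of_lt (by omega)
    rw [List.getElem_append_left (by simpa using hc)]
    rw [List.getElem_drop]
    rw [hm, List.getD_eq_getElem _ _ (by omega)]
  · have hm : (a + p) % l.length = a + p - l.length := by
      rw [Nat.mod_eq_sub_mod (by omega)]
      exact Nat.mod_eq_of_lt (by omega)
    rw [List.getElem_append_right (by simpa using hc)]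
    rw [List.getElem_take]
    rw [hm, List.getD_eq_getElem _ _ (by omega)]
    congr 1
    simp only [List.length_drop]
    omega

-- "best is the least argmin among rotations with start < c"
def LAU (l : List Char) (c m : Nat) : Prop :=
  m < c ∧ (∀ t, t < c → lexLt (Rot l t) (Rot l m) = false) ∧
    (∀ t, t < m → lexLt (Rot l m) (Rot l t) = true)

theorem loopB_spec : ∀ (cnt : Nat) (l : List Char) (c best : Nat),
    c + cnt = l.length → LAU l c best →
    LAU l l.length (findLoopB l best (List.range' c cnt)) := by
  intro cnt
  induction cnt with
  | zero =>
    intro l c best hc hb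
    have hceq : c = l.length := by omega
    subst hceq
    simpa [findLoopB] using hb
  | succ cnt ih =>
    intro l c best hc hb
    have hcn : c < l.length := by omega
    have hbn : best < l.length := by
      have := hb.1; omega
    rw [List.range'_succ]
    show LAU l l.length (findLoopB l (if lexLt (rotB l c) (rotB l best) then c else best) (List.range' (c+1) cnt))
    have hrw : lexLt (rotB l c) (rotB l best) = lexLt (Rot l c) (Rot l best) := by
      rw [rotB_eq_Rot l c (le_of_lt hcn), rotB_eq_Rot l best (le_of_lt hbn)]
    apply ih l (c+1) _ (by omega)
    rw [hrw]
    by_cases hlt : lexLt (Rot l c) (Rot l best) = true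
    · rw [if_pos hlt]
      refine ⟨Nat.lt_succ_self c, ?_, ?_⟩
      · intro t ht
        rcases Nat.lt_succ_iff_lt_or_eq.mp ht with ht' | rfl
        · by_contra hcon
          have h1 : lexLt (Rot l t) (Rot l c) = true := by
            cases h : lexLt (Rot l t) (Rot l c) with
            | true => rfl
            | false => exact absurd h hcon
          have := lexLt_trans h1 hlt
          rw [hb.2.1 t ht'] at this
          simp at this
        · exact lexLt_irrefl _
      · intro t ht
        have hfalse := hb.2.1 t ht
        rcases lexLt_total (a := Rot l best) (b := Rot l t) (by simp [length_Rot]) with h2 | h2 | h2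
        · exact lexLt_trans hlt h2
        · rw [hfalse] at h2; simp at h2
        · rw [← h2]; exact hlt
    · have hlt' : lexLt (Rot l c) (Rot l best) = false := by
        cases h : lexLt (Rot l c) (Rot l best) with
        | true => exact absurd h hlt
        | false => rfl
      rw [if_neg (by simp [hlt'])]
      refine ⟨by have := hb.1; omega, ?_, hb.2.2⟩
      intro t ht
      rcases Nat.lt_succ_iff_lt_or_eq.mp ht with ht' | rfl
      · exact hb.2.1 t ht'
      · exact hlt' 

-- the duel-elimination lemma: after a common prefix of length k and a mismatch at k,
-- every rotation b+t' (t' ≤ k) is strictly smaller than the rotation a+t'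
theorem dom_lemma (l : List Char) (a b k : Nat) (hk : k < l.length)
    (hpre : ∀ t, t < k → cAt l (a + t) = cAt l (b + t))
    (hmis : cAt l (b + k) < cAt l (a + k)) :
    ∀ t', t' ≤ k → lexLt (Rot l (b + t')) (Rot l (a + t')) = true := by
  intro t' ht'
  apply lexLt_of_agree (k - t')
  · simp [length_Rot]; omega
  · simp [length_Rot]; omega
  · intro p hp
    rw [Rot_getD _ _ _ (by omega), Rot_getD _ _ _ (by omega)]
    have h1 : b + t' + p = b + (t' + p) := by omega
    have h2 : a + t' + p = a + (t' + p) := by omega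
    rw [h1, h2]
    exact (hpre (t' + p) (by omega)).symm
  · rw [Rot_getD _ _ _ (by omega), Rot_getD _ _ _ (by omega)]
    have h1 : b + t' + (k - t') = b + k := by omega
    have h2 : a + t' + (k - t') = a + k := by omega
    rw [h1, h2]
    exact hmis

-- the loop invariant of A
def InvA (l : List Char) (k i j : Nat) : Prop :=
  i ≠ j ∧ min i j < l.length ∧ k ≤ l.length ∧ (0 < k → i < l.length ∧ j < l.length) ∧
  (∀ t, t < k → cAt l (i + t) = cAt l (j + t)) ∧
  (∀ t, t < l.length → t < max i j → t ≠ i → t ≠ j →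
    ∃ u, u < l.length ∧ lexLt (Rot l u) (Rot l t) = true)

-- full-cycle match exit: the smaller pointer is the least argmin
theorem caseA (l : List Char) (m i j : Nat) (hm : LAU l l.length m)
    (hij : i < j) (hjn : j < l.length)
    (hper : ∀ t, t < l.length → cAt l (i + t) = cAt l (j + t))
    (hI3 : ∀ t, t < l.length → t < j → t ≠ i → t ≠ j →
      ∃ u, u < l.length ∧ lexLt (Rot l u) (Rot l t) = true) :
    i = m := by
  have hn : 0 < l.length := by omega
  have hd : 0 < j - i := by omega
  -- the string is cyclically periodic with period j - i
  have step1 : ∀ x, cAt l x = cAt l (x + (j - i)) := by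
    intro x
    have ht : (x + (l.length - i)) % l.length < l.length := Nat.mod_lt _ hn
    have key1 : cAt l (i + (x + (l.length - i)) % l.length) = cAt l x := by
      rw [cAt_add_mod]
      have he : i + (x + (l.length - i)) = x + l.length := by omega
      rw [he, cAt_add_len]
    have key2 : cAt l (j + (x + (l.length - i)) % l.length) = cAt l (x + (j - i)) := by
      rw [cAt_add_mod]
      have he : j + (x + (l.length - i)) = x + (j - i) + l.length := by omega
      rw [he, cAt_add_len]
    rw [← key1, ← key2]
    exact hper _ ht
  have step2 : ∀ a, Rot l a = Rot l (a + (j - i)) := by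
    intro a
    apply Rot_congr
    intro p _
    have he : a + (j - i) + p = a + p + (j - i) := by omega
    rw [he]
    exact step1 (a + p)
  have step3 : m < j - i := by
    by_contra hcon
    have hge : j - i ≤ m := by omega
    have heq : Rot l (m - (j - i)) = Rot l m := by
      rw [step2 (m - (j - i))]
      congr 1
      omega
    have := hm.2.2 (m - (j - i)) (by omega)
    rw [heq] at this
    rw [lexLt_irrefl] at this
    exact absurd this (by simp)
  by_contra hne
  have hmn := hm.1
  obtain ⟨u, hu, hlt⟩ := hI3 m hmn (by omega) (fun h => hne h.symm) (by omega)
  have := hm.2.1 u hu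
  rw [this] at hlt
  exact absurd hlt (by simp)

-- at exit, min i j is the least argmin
theorem exit_lemma (l : List Char) (m : Nat) (hm : LAU l l.length m) (k i j : Nat)
    (hinv : InvA l k i j) (hstop : ¬(k < l.length ∧ i < l.length ∧ j < l.length)) :
    min i j = m := by
  obtain ⟨hij, hmin, hkn, hk0, hpre, hI3⟩ := hinv
  have hn : 0 < l.length := by omega
  by_cases hk : k < l.length
  · by_cases hi : i < l.length
    · -- j ≥ n : the answer is i
      have hj : ¬ j < l.length := fun h => hstop ⟨hk, hi, h⟩
      have hmi : m = i := by
        by_contra hne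
        have hmn := hm.1
        obtain ⟨u, hu, hlt⟩ := hI3 m hmn (by omega) hne (by omega)
        have := hm.2.1 u hu
        rw [this] at hlt
        exact absurd hlt (by simp)
      omega
    · -- i ≥ n : the answer is j
      have hj : j < l.length := by omega
      have hmj : m = j := by
        by_contra hne
        have hmn := hm.1
        obtain ⟨u, hu, hlt⟩ := hI3 m hmn (by omega) (by omega) hne
        have := hm.2.1 u hu
        rw [this] at hlt
        exact absurd hlt (by simp)
      omega
  · -- k = n : full cyclic match, the string has period |i - j|
    have hkn' : k = l.length := by omega
    obtain ⟨hi, hj⟩ := hk0 (by omega)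
    have hper : ∀ t, t < l.length → cAt l (i + t) = cAt l (j + t) :=
      fun t ht => hpre t (by omega)
    rcases Nat.lt_or_ge i j with hlt | hge
    · have : i = m := by
        apply caseA l m i j hm hlt hj hper
        intro t h1 h2 h3 h4
        exact hI3 t h1 (by omega) h3 h4
      omega
    · have hji : j < i := by omega
      have : j = m := by
        apply caseA l m j i hm hji hi (fun t ht => (hper t ht).symm)
        intro t h1 h2 h3 h4
        exact hI3 t h1 (by omega) h4 h3
      omega

-- invariant preservation when i jumps (i2 = i+k+1, possibly bumped past j)
theorem inv_step2gen (l : List Char) (k i j i2 : Nat)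
    (hk : k < l.length) (hi : i < l.length) (hj : j < l.length)
    (hpre : ∀ t, t < k → cAt l (i + t) = cAt l (j + t))
    (hI3 : ∀ t, t < l.length → t < max i j → t ≠ i → t ≠ j →
      ∃ u, u < l.length ∧ lexLt (Rot l u) (Rot l t) = true)
    (hgt : cAt l (j + k) < cAt l (i + k))
    (h2 : i2 ≠ j) (h3 : ∀ t, t < i2 → t ≠ j → t ≤ i + k) :
    InvA l 0 i2 j := by
  have hn : 0 < l.length := by omega
  have hdom := dom_lemma l i j k hk hpre hgt
  refine ⟨h2, by omega, by omega, by omega, by omega, ?_⟩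
  intro t htn htmax hti htj
  by_cases htieq : t = i
  · subst htieq
    refine ⟨j, hj, ?_⟩
    simpa using hdom 0 (Nat.zero_le k)
  · by_cases hto : t < max i j
    · exact hI3 t htn hto htieq htj
    · have hti2 : t < i2 := by omega
      have htk := h3 t hti2 htj
      refine ⟨(j + (t - i)) % l.length, Nat.mod_lt _ hn, ?_⟩
      rw [Rot_mod]
      have := hdom (t - i) (by omega)
      rwa [show i + (t - i) = t by omega] at this

-- invariant preservation when j jumps (j2 = j+k+1, i possibly bumped)
theorem inv_step3gen (l : List Char) (k i j i2 : Nat)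
    (hk : k < l.length) (hi : i < l.length) (hj : j < l.length)
    (hpre : ∀ t, t < k → cAt l (i + t) = cAt l (j + t))
    (hI3 : ∀ t, t < l.length → t < max i j → t ≠ i → t ≠ j →
      ∃ u, u < l.length ∧ lexLt (Rot l u) (Rot l t) = true)
    (hlt2 : cAt l (i + k) < cAt l (j + k))
    (h2 : i2 ≠ j + k + 1) (hmin2 : min i2 (j + k + 1) < l.length)
    (h5 : i = i2 ∨ i = j + k + 1) (h6 : i2 ≤ i + 1) :
    InvA l 0 i2 (j + k + 1) := by
  have hn : 0 < l.length := by omega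
  have hdom := dom_lemma l j i k hk (fun t ht => (hpre t ht).symm) hlt2
  refine ⟨h2, hmin2, by omega, by omega, by omega, ?_⟩
  intro t htn htmax hti htj
  by_cases htjeq : t = j
  · subst htjeq
    refine ⟨i, hi, ?_⟩
    simpa using hdom 0 (Nat.zero_le k)
  · by_cases htieq : t = i
    · exfalso
      rcases h5 with h | h <;> omega
    · by_cases hto : t < max i j
      · exact hI3 t htn hto htieq htjeq
      · have htj2 : t < j + k + 1 := by omega
        refine ⟨(i + (t - j)) % l.length, Nat.mod_lt _ hn, ?_⟩
        rw [Rot_mod]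
        have := hdom (t - j) (by omega)
        rwa [show j + (t - j) = t by omega] at this

theorem loopA_spec (l : List Char) (m : Nat) (hm : LAU l l.length m) :
    ∀ N k i j, 3 * l.length - (k + i + j) ≤ N → InvA l k i j →
      findLoop l N k i j = m := by
  intro N
  induction N with
  | zero =>
    intro k i j hN hinv
    have hmin := hinv.2.1
    have hstop : ¬(k < l.length ∧ i < l.length ∧ j < l.length) := by omega
    show min i j = m
    exact exit_lemma l m hm k i j hinv hstop
  | succ N ih =>
    intro k i j hN hinv
    show (if k < l.length ∧ i < l.length ∧ j < l.length then _ else min i j) = m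
    by_cases hcond : k < l.length ∧ i < l.length ∧ j < l.length
    · rw [if_pos hcond]
      obtain ⟨hij, hmin, hkn, hk0, hpre, hI3⟩ := hinv
      obtain ⟨hk, hi, hj⟩ := hcond
      by_cases heq : cAt l (i + k) = cAt l (j + k)
      · rw [if_pos heq]
        apply ih _ _ _ (by omega)
        refine ⟨hij, hmin, by omega, fun _ => ⟨hi, hj⟩, ?_, hI3⟩
        intro t ht
        rcases Nat.lt_succ_iff_lt_or_eq.mp ht with ht' | rfl
        · exact hpre t ht'
        · exact heq
      · rw [if_neg heq]
        by_cases hgt : cAt l (j + k) < cAt l (i + k)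
        · rw [if_pos hgt]
          apply ih _ _ _ (by split_ifs <;> omega)
          split_ifs with hb
          · exact inv_step2gen l k i j (i + k + 2) hk hi hj hpre hI3 hgt
              (by omega) (by intro t h1 h2; omega)
          · exact inv_step2gen l k i j (i + k + 1) hk hi hj hpre hI3 hgt hb
              (by intro t h1 h2; omega)
        · rw [if_neg hgt]
          have hlt2 : cAt l (i + k) < cAt l (j + k) :=
            lt_of_le_of_ne (not_lt.mp hgt) heq
          apply ih _ _ _ (by split_ifs <;> omega)
          split_ifs with hb
          · exact inv_step3gen l k i j (i + 1) hk hi hj hpre hI3 hlt2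
              (by omega) (by omega) (Or.inr hb) (by omega)
          · exact inv_step3gen l k i j i hk hi hj hpre hI3 hlt2 hb
              (by omega) (Or.inl rfl) (by omega)
    · rw [if_neg hcond]
      exact exit_lemma l m hm k i j hinv hcond

theorem find_eq (it : String) : find it = find_alt it := by
  unfold find find_alt
  by_cases hl : it.toList.length = 0
  · rw [hl]
    simp [findLoop, findLoopB]
  · have hn : 0 < it.toList.length := by omega
    have hLA : LAU it.toList it.toList.length
        (findLoopB it.toList 0 (List.range' 1 (it.toList.length - 1))) := by
      apply loopB_spec (it.toList.length - 1) it.toList 1 0 (by omega)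
      refine ⟨Nat.one_pos, ?_, by intro t ht; omega⟩
      intro t ht
      have ht0 : t = 0 := by omega
      subst ht0
      exact lexLt_irrefl _
    congr 1
    apply loopA_spec it.toList _ hLA (3 * it.toList.length) 0 0 1 (by omega)
    refine ⟨by omega, by omega, by omega, by omega, by intro t ht; omega, ?_⟩
    intro t h1 h2 h3 h4
    exfalso
    omega

-- ===== VERDICT (by name: the statement is the Claim_ definition above) =====
theorem find_spec : Claim_equal_find := by
  intro it _
  show find it = find_alt it
  exact find_eq it
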